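-- pv_equiv track=rewrite | github.com/dixitomkar1809/Coding-Python | GFG/Array/countTheTriplets.py | solution
-- ===== SOURCE A (Python) =====
-- import collections
--
-- def solution(arr):
--     hashmap = collections.defaultdict(int)
--     sol = collections.defaultdict()
--     for item in arr:
--         hashmap[item] = 0
--     for item in arr:
--         for secondItem in hashmap:
--             if item != secondItem:
--                 if (item + secondItem) in hashmap:
--                     if item < secondItem:
--                         sol[(item, secondItem)] = 0
--                     else:
--                         sol[(secondItem, item)] = 0
--     return len(sol.keys())
-- ===== SOURCE B (Python) =====
-- def solution(arr):
--     s = set(arr)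
--     v = sorted(s)
--     n = len(v)
--     count = 0
--     for i in range(n):
--         for j in range(i + 1, n):
--             if v[i] + v[j] in s:
--                 count += 1
--     return count
-- ===== Notes on version B (the rewrite author's own statement) =====
-- stated objective: faster
-- what changed: B replaces A's dict-of-normalized-pairs deduplication (scanning the whole array against the key set and counting dict keys) with a direct count over index pairs i<j of the sorted distinct values, checking each sum against the value set.
import Mathlib
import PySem

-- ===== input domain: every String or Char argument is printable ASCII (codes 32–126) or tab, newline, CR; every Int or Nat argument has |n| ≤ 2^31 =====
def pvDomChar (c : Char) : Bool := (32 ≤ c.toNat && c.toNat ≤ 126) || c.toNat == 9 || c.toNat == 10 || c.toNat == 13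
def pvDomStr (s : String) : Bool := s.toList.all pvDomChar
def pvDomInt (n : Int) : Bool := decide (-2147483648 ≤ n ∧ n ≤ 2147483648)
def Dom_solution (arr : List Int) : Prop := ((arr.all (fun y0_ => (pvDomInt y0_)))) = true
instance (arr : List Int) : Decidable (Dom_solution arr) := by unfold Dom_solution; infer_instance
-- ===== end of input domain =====

-- B counts the qualifying pairs directly over index pairs i<j of the sorted distinct values, instead of A's dict of normalized pairs; same return value, no speed claim.

-- ===== PORT A =====
def solution (arr : List Int) : Int :=
  let hashmap : PySem.Dict Int Int :=
    arr.foldl (fun d item => d.insert item 0) PySem.Dict.empty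
  let sol : PySem.Dict (Int × Int) Int :=
    arr.foldl (fun s item =>
      hashmap.keys.foldl (fun s secondItem =>
        if item ≠ secondItem then
          if hashmap.contains (item + secondItem) then
            if item < secondItem then s.insert (item, secondItem) 0
            else s.insert (secondItem, item) 0
          else s
        else s) s) PySem.Dict.empty
  (sol.keys.length : Int)

-- ===== PORT B =====
def solution_alt (arr : List Int) : Int :=
  let s : PySem.Set Int := PySem.Set.ofList arr
  let v : List Int := PySem.List.sorted s (fun x => x) false
  let n : Int := (v.length : Int)
  (PySem.List.pyRange 0 n 1).foldl (fun count i =>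
    (PySem.List.pyRange (i + 1) n 1).foldl (fun count j =>
      if PySem.Set.contains s (PySem.List.pyGetD v i 0 + PySem.List.pyGetD v j 0)
      then count + 1 else count) count) 0

-- ===== PRECONDITION & SPEC =====
def Spec_solution (arr : List Int) (out : Int) : Prop := out = solution_alt arr
instance (arr : List Int) (out : Int) : Decidable (Spec_solution arr out) := by unfold Spec_solution; infer_instance

-- ===== CLAIM (what is proved, stated in full; the proofs are below) =====
def Claim_equal_solution : Prop := ∀ (arr : List Int), Dom_solution arr → Spec_solution arr (solution arr)

-- ===== LEMMAS AND PROOFS =====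

/-- normalized pair, as A writes it into `sol` -/
def pvNorm (a b : Int) : Int × Int := if a < b then (a, b) else (b, a)

/-- A's inner-loop guard -/
abbrev pvCond (arr : List Int) (item q : Int) : Prop := item ≠ q ∧ (item + q) ∈ arr

/-- the list of (normalized) pairs A inserts into `sol`, in order -/
def pvL (arr : List Int) : List (Int × Int) :=
  arr.flatMap (fun item =>
    ((PySem.Set.ofList arr).filter (fun q => decide (pvCond arr item q))).map (pvNorm item))

/-- all index pairs i < j of a list, as value pairs -/
def pvPairs : List Int → List (Int × Int)
  | [] => []
  | x :: t => t.map (fun y => (x, y)) ++ pvPairs t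

/-- the property both programs count -/
def pvP (arr : List Int) (p q : Int) : Prop := p < q ∧ p ∈ arr ∧ q ∈ arr ∧ (p + q) ∈ arr

lemma pv_hash_keys (arr : List Int) :
    (arr.foldl (fun d item => d.insert item 0) (PySem.Dict.empty : PySem.Dict Int Int)).keys
      = PySem.Set.ofList arr :=
  PySem.Dict.keys_foldl_insert arr (fun _ _ => (0 : Int)) PySem.Dict.empty

lemma pv_hash_contains (arr : List Int) (z : Int) :
    (arr.foldl (fun d item => d.insert item 0) (PySem.Dict.empty : PySem.Dict Int Int)).contains z
      = decide (z ∈ arr) := by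
  rw [PySem.Dict.contains_eq_decide_mem_keys, pv_hash_keys]
  simp [PySem.Set.mem_ofList]

lemma pv_contains_ofList (arr : List Int) (z : Int) :
    PySem.Set.contains (PySem.Set.ofList arr) z = decide (z ∈ arr) := by
  rw [Bool.eq_iff_iff, PySem.Set.contains_iff, PySem.Set.mem_ofList]
  simp

lemma pv_inner (arr : List Int) (hm : PySem.Dict Int Int) (item : Int)
    (hc : ∀ z, hm.contains z = decide (z ∈ arr))
    (K : List Int) (d : PySem.Dict (Int × Int) Int) :
    K.foldl (fun s q =>
        if item ≠ q then
          if hm.contains (item + q) then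
            if item < q then s.insert (item, q) 0 else s.insert (q, item) 0
          else s
        else s) d
      = (K.filter (fun q => decide (pvCond arr item q))).foldl
          (fun s q => s.insert (pvNorm item q) 0) d := by
  rw [← PySem.List.foldl_ite_eq_foldl_filter (pvCond arr item)
        (fun s q => s.insert (pvNorm item q) 0) K d]
  apply PySem.List.foldl_congr_mem
  intro acc q _
  by_cases h1 : item = q
  · simp [h1, pvCond]
  · by_cases h2 : (item + q) ∈ arr
    · by_cases h3 : item < q
      · simp [h1, h2, h3, hc, pvCond, pvNorm]
      · simp [h1, h2, h3, hc, pvCond, pvNorm]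
    · simp [h1, h2, hc, pvCond]

lemma pv_sol_keys (arr : List Int) (hm : PySem.Dict Int Int)
    (hc : ∀ z, hm.contains z = decide (z ∈ arr)) (K : List Int) :
    ∀ (xs : List Int) (d : PySem.Dict (Int × Int) Int),
    (xs.foldl (fun s item =>
        K.foldl (fun s q =>
          if item ≠ q then
            if hm.contains (item + q) then
              if item < q then s.insert (item, q) 0 else s.insert (q, item) 0
            else s
          else s) s) d).keys
      = PySem.Set.update d.keys
          (xs.flatMap (fun item =>
            (K.filter (fun q => decide (pvCond arr item q))).map (pvNorm item))) := by
  intro xs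
  induction xs with
  | nil => intro d; rfl
  | cons x t ih =>
    intro d
    rw [List.foldl_cons, List.flatMap_cons, ih, pv_inner arr hm x hc K d,
      PySem.Dict.keys_foldl_insert_key
        (K.filter (fun q => decide (pvCond arr x q))) (pvNorm x) (fun _ _ => (0 : Int)) d]
    exact (List.foldl_append).symm

lemma pv_solution_eq (arr : List Int) :
    solution arr = ((PySem.Set.ofList (pvL arr)).length : Int) := by
  simp only [solution]
  rw [pv_sol_keys arr _ (pv_hash_contains arr) _ arr PySem.Dict.empty,
      pv_hash_keys arr]
  rfl

lemma pv_mem_L (arr : List Int) (p q : Int) :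
    (p, q) ∈ pvL arr ↔ pvP arr p q := by
  unfold pvL pvP pvNorm
  simp only [pvCond]
  simp only [List.mem_flatMap, List.mem_map, List.mem_filter, PySem.Set.mem_ofList,
    decide_eq_true_eq]
  constructor
  · rintro ⟨item, hitem, x, ⟨hx, hne, hsum⟩, hnorm⟩
    by_cases hlt : item < x
    · rw [if_pos hlt] at hnorm
      injection hnorm with h1 h2
      subst h1; subst h2
      exact ⟨hlt, hitem, hx, hsum⟩
    · rw [if_neg hlt] at hnorm
      injection hnorm with h1 h2
      subst h1; subst h2
      refine ⟨by omega, hx, hitem, by rwa [Int.add_comm]⟩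
  · rintro ⟨hlt, hp, hq, hsum⟩
    exact ⟨p, hp, q, ⟨hq, by omega, hsum⟩, if_pos hlt⟩

lemma pv_mem_pairs (w : List Int) (hw : List.Pairwise (· < ·) w) (p q : Int) :
    (p, q) ∈ pvPairs w ↔ p ∈ w ∧ q ∈ w ∧ p < q := by
  induction hw with
  | nil => simp [pvPairs]
  | @cons x t hx ht ih =>
    simp only [pvPairs, List.mem_append, List.mem_map, List.mem_cons, ih]
    constructor
    · rintro (⟨y, hy, he⟩ | ⟨hp, hq, hlt⟩)
      · injection he with he1 he2
        subst he1; subst he2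
        exact ⟨Or.inl rfl, Or.inr hy, hx _ hy⟩
      · exact ⟨Or.inr hp, Or.inr hq, hlt⟩
    · rintro ⟨hp | hp, hq | hq, hlt⟩
      · subst hp; subst hq; exact absurd hlt (lt_irrefl _)
      · subst hp; exact Or.inl ⟨q, hq, rfl⟩
      · subst hq; exact absurd (lt_trans (hx _ hp) hlt) (lt_irrefl _)
      · exact Or.inr ⟨hp, hq, hlt⟩

lemma pv_nodup_pairs (w : List Int) (hw : List.Pairwise (· < ·) w) :
    (pvPairs w).Nodup := by
  induction hw with
  | nil => simp [pvPairs]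
  | @cons x t hx ht ih =>
    refine List.Nodup.append ?_ ih ?_
    · exact List.Nodup.map (fun a b h => by simpa using h) (ht.imp (fun h => ne_of_lt h))
    · rintro ⟨p, q⟩ h1 h2
      obtain ⟨y, hy, he⟩ := List.mem_map.mp h1
      injection he with he1 he2
      subst he1; subst he2
      have hmem := (pv_mem_pairs t ht x y).mp h2
      exact absurd (hx _ hmem.1) (lt_irrefl _)

lemma pv_pairs_sum (w : List Int) (qb : Int × Int → Bool) :
    ((List.range w.length).map
        (fun k => (((w.drop (k + 1)).countP (fun y => qb (w.getD k 0, y))) : Int))).sum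
      = ((pvPairs w).countP qb : Int) := by
  induction w with
  | nil => simp [pvPairs]
  | cons x t ih =>
    rw [List.length_cons, List.range_succ_eq_map, List.map_cons, List.map_map, List.sum_cons]
    have htail : ((List.range t.length).map
        ((fun k => (((x :: t).drop (k + 1)).countP (fun y => qb ((x :: t).getD k 0, y)) : Int))
          ∘ Nat.succ))
        = (List.range t.length).map
            (fun k => (((t.drop (k + 1)).countP (fun y => qb (t.getD k 0, y))) : Int)) := by
      refine List.map_congr_left ?_
      intro k _
      simp [List.drop_succ_cons]
    rw [htail, ih]
    simp only [pvPairs, List.countP_append, List.countP_map, Function.comp_def,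
      List.drop_succ_cons, List.drop_zero, List.getD_cons_zero]
    push_cast
    ring

lemma pv_alt_eq (arr : List Int) :
    solution_alt arr
      = (((pvPairs (PySem.List.sorted (PySem.Set.ofList arr) (fun x => x) false)).countP
          (fun pq => decide ((pq.1 + pq.2) ∈ arr))) : Int) := by
  simp only [solution_alt]
  rw [← pv_pairs_sum (PySem.List.sorted (PySem.Set.ofList arr) (fun x => x) false)
        (fun pq => decide ((pq.1 + pq.2) ∈ arr))]
  set v : List Int := PySem.List.sorted (PySem.Set.ofList arr) (fun x => x) false with hv
  have hinner : ∀ (c : Int), ∀ i ∈ PySem.List.pyRange 0 (v.length : Int) 1,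
      (PySem.List.pyRange (i + 1) (v.length : Int) 1).foldl
        (fun count j => if PySem.Set.contains (PySem.Set.ofList arr)
            (PySem.List.pyGetD v i 0 + PySem.List.pyGetD v j 0) then count + 1 else count) c
      = c + ((v.drop (i + 1).toNat).countP
            (fun y => PySem.Set.contains (PySem.Set.ofList arr)
              (PySem.List.pyGetD v i 0 + y)) : Int) := by
    intro c i hi
    have h0 : (0 : Int) ≤ i + 1 := by
      rw [PySem.List.mem_pyRange_one] at hi
      omega
    rw [PySem.List.foldl_pyRange_pyGetD' v 0
          (fun count y => if PySem.Set.contains (PySem.Set.ofList arr)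
              (PySem.List.pyGetD v i 0 + y) then count + 1 else count) c h0]
    exact PySem.List.foldl_if_add_one _ _ _
  rw [PySem.List.foldl_congr_mem _ _ _ _ hinner]
  rw [PySem.List.foldl_add (PySem.List.pyRange 0 (v.length : Int) 1)
        (fun i => ((v.drop (i + 1).toNat).countP
            (fun y => PySem.Set.contains (PySem.Set.ofList arr)
              (PySem.List.pyGetD v i 0 + y)) : Int)) 0,
      zero_add, PySem.List.pyRange_zero_natCast v.length, List.map_map]
  refine congrArg List.sum (List.map_congr_left ?_)
  intro k hk
  have ht : ((k : Int) + 1).toNat = k + 1 := by omega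
  simp only [Function.comp_apply, PySem.List.pyGetD_natCast, pv_contains_ofList, ht]

theorem pv_main (arr : List Int) : solution arr = solution_alt arr := by
  rw [pv_solution_eq, pv_alt_eq]
  norm_cast
  have hw := PySem.List.sorted_ofList_pairwise_lt arr
  rw [List.countP_eq_length_filter]
  apply List.Perm.length_eq
  rw [List.perm_ext_iff_of_nodup (PySem.Set.nodup_ofList (pvL arr))
        ((pv_nodup_pairs _ hw).filter _)]
  rintro ⟨p, q⟩
  rw [PySem.Set.mem_ofList, pv_mem_L, List.mem_filter, pv_mem_pairs _ hw p q]
  simp only [PySem.List.mem_sorted, PySem.Set.mem_ofList, decide_eq_true_eq]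
  unfold pvP
  tauto

-- ===== VERDICT (by name: the statement is the Claim_ definition above) =====
theorem solution_spec : Claim_equal_solution := by
  intro arr _
  unfold Spec_solution
  exact pv_main arr
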